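-- pv_equiv track=rewrite | github.com/nick9956/Python_for_Data_Quality_Engineers | HW_4_2.py | track_max_values
-- ===== SOURCE A (Python) =====
-- def track_max_values(dict_list):
--     """Track the maximum value and its source dictionary index for each key."""
--     def update_key_tracker(tracker, d, index):
--         """Update the tracker with key-value pairs from a single dictionary."""
--         for key, value in d.items():  # Iterate over key-value pairs in the dictionary
--             # If the key is not in the tracker or the value is greater than the current tracked value, update it
--             if key not in tracker or value > tracker[key][0]:
--                 tracker[key] = (value, index)  # Store the new value and the index of the source dictionary
--
--     tracker = {}  # Initialize an empty dictionary to track maximum values and their source dictionaries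
--     for i, d in enumerate(dict_list):  # Enumerate over dictionaries with their indices
--         update_key_tracker(tracker, d, i)  # Update the tracker for the current dictionary
--     return tracker  # Return the tracker with maximum values and their sources
-- ===== SOURCE B (Python) =====
-- def track_max_values(dict_list):
--     """Track the maximum value and its source dictionary index for each key."""
--     groups = {}
--     for i, d in enumerate(dict_list):
--         for key, value in d.items():
--             groups.setdefault(key, []).append((value, i))
--     return {key: max(pairs, key=lambda t: t[0]) for key, pairs in groups.items()}
-- ===== Notes on version B (the rewrite author's own statement) =====
-- stated objective: alternative
-- what changed: Replaces A's single-pass compare-and-update tracker by a two-phase decomposition: first group all (value, index) pairs per key with setdefault/append, then reduce each group with max(pairs, key=first) whose first-wins rule reproduces A's strict '>' update.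
import Mathlib
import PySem

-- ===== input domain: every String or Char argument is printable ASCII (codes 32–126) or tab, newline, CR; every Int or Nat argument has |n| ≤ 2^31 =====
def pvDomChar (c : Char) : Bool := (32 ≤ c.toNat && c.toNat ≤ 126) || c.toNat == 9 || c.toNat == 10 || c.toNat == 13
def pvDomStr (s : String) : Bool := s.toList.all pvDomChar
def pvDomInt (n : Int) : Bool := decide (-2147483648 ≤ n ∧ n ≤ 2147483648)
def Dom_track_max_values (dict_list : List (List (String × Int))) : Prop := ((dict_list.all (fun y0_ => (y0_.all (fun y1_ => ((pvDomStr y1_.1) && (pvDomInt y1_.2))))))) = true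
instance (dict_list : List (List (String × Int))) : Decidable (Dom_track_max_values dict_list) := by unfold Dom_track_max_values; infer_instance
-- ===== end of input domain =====

-- B replaces A's single-pass compare-and-update tracker by a two-phase decomposition
-- (group all (value, index) pairs per key, then reduce each group with first-max); alternative, same cost.


-- ===== PORT A =====
-- inner helper: update the tracker with the key-value pairs of one dictionary
def tmvUpdateKeyTracker (tracker : PySem.Dict String (Int × Int)) (d : List (String × Int)) (index : Int) :
    PySem.Dict String (Int × Int) :=
  d.foldl (fun tr kv =>
    match tr.get? kv.1 with
    | none => tr.insert kv.1 (kv.2, index)                                   -- key not in tracker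
    | some cur => if kv.2 > cur.1 then tr.insert kv.1 (kv.2, index) else tr  -- value > tracker[key][0]
    ) tracker

def track_max_values (dict_list : List (List (String × Int))) : List (String × Int × Int) :=
  ((PySem.List.enumerate dict_list 0).foldl
    (fun tracker p => tmvUpdateKeyTracker tracker p.2 p.1)
    PySem.Dict.empty).items

-- ===== PORT B =====
-- first pass: groups[key] = list of (value, index) pairs, in encounter order
def tmvGroups (dict_list : List (List (String × Int))) : PySem.Dict String (List (Int × Int)) :=
  (PySem.List.enumerate dict_list 0).foldl
    (fun groups p =>
      p.2.foldl (fun g kv => g.modify kv.1 [] (fun l => l ++ [(kv.2, p.1)])) groups)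
    PySem.Dict.empty

-- second pass: reduce each group with max(pairs, key=lambda t: t[0]) (first maximal wins);
-- groups are always nonempty, so the `.getD (0, 0)` totalizer is never taken
def track_max_values_alt (dict_list : List (List (String × Int))) : List (String × Int × Int) :=
  (tmvGroups dict_list).items.map
    (fun p => (p.1, (PySem.List.max? p.2 (fun t => t.1)).getD (0, 0)))

-- ===== PRECONDITION & SPEC =====
def Spec_track_max_values (dict_list : List (List (String × Int))) (out : List (String × Int × Int)) : Prop := out = track_max_values_alt dict_list
instance (dict_list : List (List (String × Int))) (out : List (String × Int × Int)) : Decidable (Spec_track_max_values dict_list out) := by unfold Spec_track_max_values; infer_instance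

-- ===== CLAIM (what is proved, stated in full; the proofs are below) =====
def Claim_equal_track_max_values : Prop := ∀ (dict_list : List (List (String × Int))), Dom_track_max_values dict_list → Spec_track_max_values dict_list (track_max_values dict_list)

-- ===== LEMMAS AND PROOFS =====

-- first-max of a group, as B computes it
def tmvFmax (l : List (Int × Int)) : Int × Int :=
  (PySem.List.max? l (fun t => t.1)).getD (0, 0)

def tmvFmaxPair (p : String × List (Int × Int)) : String × Int × Int := (p.1, tmvFmax p.2)

-- A's one-triple step (key, (value, index))
def tmvStepA (tr : PySem.Dict String (Int × Int)) (t : String × Int × Int) :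
    PySem.Dict String (Int × Int) :=
  match tr.get? t.1 with
  | none => tr.insert t.1 t.2
  | some cur => if t.2.1 > cur.1 then tr.insert t.1 t.2 else tr

-- B's one-triple step
def tmvStepG (g : PySem.Dict String (List (Int × Int))) (t : String × Int × Int) :
    PySem.Dict String (List (Int × Int)) :=
  g.modify t.1 [] (fun l => l ++ [t.2])

-- the flattened stream of (key, (value, index)) triples
def tmvTriples (dict_list : List (List (String × Int))) : List (String × Int × Int) :=
  (PySem.List.enumerate dict_list 0).flatMap (fun p => p.2.map (fun kv => (kv.1, kv.2, p.1)))

theorem tmvFoldl_flatMap {α β σ : Type} (l : List α) (f : α → List β) (g : σ → β → σ) (s : σ) :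
    (l.flatMap f).foldl g s = l.foldl (fun s a => (f a).foldl g s) s := by
  induction l generalizing s with
  | nil => rfl
  | cons x xs ih => simp [List.flatMap_cons, List.foldl_append, ih]

theorem tmvA_eq_triples (dict_list : List (List (String × Int))) :
    track_max_values dict_list = ((tmvTriples dict_list).foldl tmvStepA PySem.Dict.empty).items := by
  unfold track_max_values tmvTriples
  rw [tmvFoldl_flatMap]
  have hfun : (fun (tracker : PySem.Dict String (Int × Int)) (p : Int × List (String × Int)) =>
      tmvUpdateKeyTracker tracker p.2 p.1)
      = (fun tr p => (p.2.map (fun kv => (kv.1, kv.2, p.1))).foldl tmvStepA tr) := by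
    funext tr p
    unfold tmvUpdateKeyTracker
    rw [List.foldl_map]
    rfl
  rw [hfun]

theorem tmvB_eq_triples (dict_list : List (List (String × Int))) :
    tmvGroups dict_list = (tmvTriples dict_list).foldl tmvStepG PySem.Dict.empty := by
  unfold tmvGroups tmvTriples
  rw [tmvFoldl_flatMap]
  have hfun : (fun (groups : PySem.Dict String (List (Int × Int))) (p : Int × List (String × Int)) =>
      p.2.foldl (fun g kv => g.modify kv.1 [] (fun l => l ++ [(kv.2, p.1)])) groups)
      = (fun g p => (p.2.map (fun kv => (kv.1, kv.2, p.1))).foldl tmvStepG g) := by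
    funext g p
    rw [List.foldl_map]
    rfl
  rw [hfun]

-- lookup through the value-mapping of an items list
theorem tmvGet?_map (l : List (String × List (Int × Int))) (k : String) :
    (PySem.Dict.mk (l.map tmvFmaxPair)).get? k = ((PySem.Dict.mk l).get? k).map tmvFmax := by
  induction l with
  | nil => rfl
  | cons p rest ih =>
      obtain ⟨pk, pv⟩ := p
      simp only [List.map_cons, tmvFmaxPair, PySem.Dict.get?_mk_cons]
      by_cases h : pk == k
      · simp [h]
      · simp [h, ih]

-- Python max's first-wins append rule
theorem tmvFmax_append (l : List (Int × Int)) (p : Int × Int) (h : l ≠ []) :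
    tmvFmax (l ++ [p]) = if p.1 > (tmvFmax l).1 then p else tmvFmax l := by
  rcases hml : PySem.List.max? l (fun t : Int × Int => t.1) with _ | m
  · rw [PySem.List.max?_eq_none_iff] at hml
    exact absurd hml h
  · have hstep : PySem.List.max? (l ++ [p]) (fun t : Int × Int => t.1) =
        if m.1 < p.1 then some p else some m := by
      unfold PySem.List.max? at hml ⊢
      rw [List.foldl_append, hml]
      rfl
    unfold tmvFmax
    rw [hstep, hml]
    simp only [Option.getD_some, gt_iff_lt]
    split <;> rfl

-- the invariant connecting A's tracker with B's groups
def tmvInv (g : PySem.Dict String (List (Int × Int))) (tr : PySem.Dict String (Int × Int)) : Prop :=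
  tr = PySem.Dict.mk (g.items.map tmvFmaxPair) ∧ (∀ p ∈ g.items, p.2 ≠ []) ∧ g.keys.Nodup

theorem tmvInv_step (g : PySem.Dict String (List (Int × Int))) (tr : PySem.Dict String (Int × Int))
    (t : String × Int × Int) (h : tmvInv g tr) : tmvInv (tmvStepG g t) (tmvStepA tr t) := by
  obtain ⟨htr, hne, hnd⟩ := h
  have hget : tr.get? t.1 = (g.get? t.1).map tmvFmax := by
    rw [htr]; exact tmvGet?_map g.items t.1
  have hmod : tmvStepG g t = g.insert t.1 (g.getD t.1 [] ++ [t.2]) := rfl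
  cases hg : g.get? t.1 with
  | none =>
      have htrn : tr.get? t.1 = none := by rw [hget, hg]; rfl
      have hgc : g.contains t.1 = false := by
        rw [PySem.Dict.contains_eq_isSome_get?, hg]; rfl
      have htc : tr.contains t.1 = false := by
        rw [PySem.Dict.contains_eq_isSome_get?, htrn]; rfl
      have hstepA : tmvStepA tr t = tr.insert t.1 t.2 := by unfold tmvStepA; rw [htrn]
      have hstepG : tmvStepG g t = g.insert t.1 [t.2] := by
        rw [hmod, PySem.Dict.getD_of_not_contains _ _ hgc]; rfl
      refine ⟨?_, ?_, ?_⟩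
      · rw [hstepA, hstepG]
        apply PySem.Dict.ext
        rw [PySem.Dict.items_insert_of_not_contains _ _ htc,
            PySem.Dict.items_insert_of_not_contains _ _ hgc]
        simp only [List.map_append, List.map_cons, List.map_nil, tmvFmaxPair]
        rw [htr]
        have : tmvFmax [t.2] = t.2 := by
          simp [tmvFmax, PySem.List.max?]
        rw [this]
      · rw [hstepG]
        intro p hp
        rw [PySem.Dict.items_insert_of_not_contains _ _ hgc] at hp
        rcases List.mem_append.mp hp with h1 | h1
        · exact hne p h1
        · simp at h1; subst h1; simp
      · rw [hstepG]; exact PySem.Dict.nodup_keys_insert _ _ _ hnd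
  | some l =>
      have hlmem : (t.1, l) ∈ g.items := PySem.Dict.mem_items_of_get?_eq_some _ hg
      have hlne : l ≠ [] := hne _ hlmem
      have htrs : tr.get? t.1 = some (tmvFmax l) := by rw [hget, hg]; rfl
      have hgc : g.contains t.1 = true := by
        rw [PySem.Dict.contains_eq_isSome_get?, hg]; rfl
      have hgd : g.getD t.1 [] = l := PySem.Dict.getD_of_get?_eq_some _ _ hg
      have hstepG : tmvStepG g t = g.insert t.1 (l ++ [t.2]) := by rw [hmod, hgd]
      have hstepA : tmvStepA tr t =
          (if t.2.1 > (tmvFmax l).1 then tr.insert t.1 t.2 else tr) := by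
        unfold tmvStepA; rw [htrs]
      -- the unique entry of g at key t.1 is (t.1, l)
      have huniq : ∀ p ∈ g.items, p.1 = t.1 → p = (t.1, l) := by
        intro p hp hpk
        have : g.get? p.1 = some p.2 := PySem.Dict.get?_of_mem_items _ hp hnd
        rw [hpk, hg] at this
        obtain rfl : l = p.2 := by injection this
        exact (Prod.ext hpk rfl)
      have hitems := PySem.Dict.items_insert_of_contains g (l ++ [t.2]) hgc
      refine ⟨?_, ?_, ?_⟩
      · apply PySem.Dict.ext
        rw [hstepG, hitems]
        have htr_items : tr.items = g.items.map tmvFmaxPair := by rw [htr]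
        rw [hstepA]
        have hfm := tmvFmax_append l t.2 hlne
        by_cases hcmp : t.2.1 > (tmvFmax l).1
        · simp only [if_pos hcmp]
          have htc : tr.contains t.1 = true := by
            rw [PySem.Dict.contains_eq_isSome_get?, htrs]; rfl
          rw [PySem.Dict.items_insert_of_contains _ _ htc, htr_items, List.map_map,
              List.map_map]
          apply List.map_congr_left
          intro p hp
          simp only [Function.comp_apply, tmvFmaxPair]
          by_cases hpk : p.1 == t.1
          · have hpe : p = (t.1, l) := huniq p hp (by simpa using hpk)
            subst hpe
            simp only [hpk, if_pos]
            simp only [hfm, if_pos hcmp]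
          · simp [hpk]
        · simp only [if_neg hcmp]
          rw [htr_items, List.map_map]
          apply List.map_congr_left
          intro p hp
          simp only [Function.comp_apply, tmvFmaxPair]
          by_cases hpk : p.1 == t.1
          · have hpe : p = (t.1, l) := huniq p hp (by simpa using hpk)
            subst hpe
            simp only [hpk, if_pos]
            simp only [hfm, if_neg hcmp]
          · simp [hpk]
      · rw [hstepG]
        intro p hp
        rw [PySem.Dict.items_insert_of_contains _ _ hgc] at hp
        obtain ⟨q, hq, hqe⟩ := List.mem_map.mp hp
        by_cases hqk : q.1 == t.1
        · rw [if_pos hqk] at hqe; subst hqe; simp [hlne]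
        · rw [if_neg hqk] at hqe; subst hqe; exact hne q hq
      · rw [hstepG]; exact PySem.Dict.nodup_keys_insert _ _ _ hnd

theorem tmvInv_foldl (L : List (String × Int × Int)) (g : PySem.Dict String (List (Int × Int)))
    (tr : PySem.Dict String (Int × Int)) (h : tmvInv g tr) :
    tmvInv (L.foldl tmvStepG g) (L.foldl tmvStepA tr) := by
  induction L generalizing g tr with
  | nil => exact h
  | cons t L ih => exact ih _ _ (tmvInv_step g tr t h)

-- ===== VERDICT (by name: the statement is the Claim_ definition above) =====
theorem track_max_values_spec : Claim_equal_track_max_values := by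
  intro dict_list _
  unfold Spec_track_max_values track_max_values_alt
  rw [tmvA_eq_triples, tmvB_eq_triples]
  have h0 : tmvInv PySem.Dict.empty PySem.Dict.empty := by
    refine ⟨rfl, ?_, ?_⟩ <;> simp [PySem.Dict.empty, PySem.Dict.keys]
  obtain ⟨h1, _, _⟩ := tmvInv_foldl (tmvTriples dict_list) _ _ h0
  rw [h1]
  rfl
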